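-- pv_equiv track=rewrite | github.com/chun-mura/tomd-cli | src/tomd/pdf.py | _find_table_region
-- ===== SOURCE A (Python) =====
-- def _find_table_region(
--     lines: list[str],
--     cell_texts: set[str],
-- ) -> tuple[int | None, int | None]:
--     """Find the start and end line indices of the table region in MarkItDown output."""
--     long_texts = {t for t in cell_texts if len(t) > 5}
--
--     start: int | None = None
--     end: int | None = None
--
--     for i, line in enumerate(lines):
--         stripped = line.strip()
--         if not stripped:
--             continue
--         is_table = stripped in cell_texts
--         if not is_table:
--             is_table = any(ct in stripped for ct in long_texts)
--         if is_table:
--             if start is None: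
--                 start = i
--             end = i
--
--     return start, end
-- ===== SOURCE B (Python) =====
-- def _find_table_region(
--     lines: list[str],
--     cell_texts: set[str],
-- ) -> tuple[int | None, int | None]:
--     """Find the start and end line indices of the table region in MarkItDown output."""
--     long_texts = [t for t in cell_texts if len(t) > 5]
--
--     def _matches(line):
--         s = line.strip()
--         return bool(s) and (s in cell_texts or any(t in s for t in long_texts))
--
--     start = None
--     for i, line in enumerate(lines):
--         if _matches(line):
--             start = i
--             break
--     if start is None:
--         return None, None
--     end = None
--     for j, line in reversed(list(enumerate(lines))):
--         if _matches(line):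
--             end = j
--             break
--     return start, end
-- ===== Notes on version B (the rewrite author's own statement) =====
-- stated objective: faster
-- what changed: Instead of one full pass maintaining start/end accumulators, B factors the match test into a helper and finds start by a forward scan with early break and end by a backward scan with early break, so only the lines up to the first match and after the last match are ever tested.
import Mathlib
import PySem

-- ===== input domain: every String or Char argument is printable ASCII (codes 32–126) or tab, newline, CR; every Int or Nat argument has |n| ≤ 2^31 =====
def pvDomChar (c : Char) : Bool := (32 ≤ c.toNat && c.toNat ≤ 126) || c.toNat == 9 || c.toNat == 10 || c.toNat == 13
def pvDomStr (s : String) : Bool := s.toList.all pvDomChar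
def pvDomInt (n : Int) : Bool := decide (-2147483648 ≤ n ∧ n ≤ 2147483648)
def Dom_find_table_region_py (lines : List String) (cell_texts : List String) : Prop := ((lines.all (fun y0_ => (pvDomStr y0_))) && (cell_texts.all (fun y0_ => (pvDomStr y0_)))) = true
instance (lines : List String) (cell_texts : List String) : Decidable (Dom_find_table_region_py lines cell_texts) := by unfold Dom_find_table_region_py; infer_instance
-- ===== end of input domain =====

-- B replaces A's single full pass maintaining start/end accumulators by a forward
-- early-exit scan for start and a backward early-exit scan for end (alternative decomposition).

-- ===== PORT A =====
-- A's loop over enumerate(lines) with state (start, end).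
def pvLoopA (cell_texts long_texts : List String) :
    List (Int × String) → (Option Int × Option Int) → Option Int × Option Int
  | [], st => st
  | (i, line) :: rest, (start, end_) =>
    let stripped := PySem.Str.strip line
    if stripped == "" then
      pvLoopA cell_texts long_texts rest (start, end_)
    else
      let is_table := PySem.Set.contains cell_texts stripped
      let is_table := if !is_table then long_texts.any (fun ct => PySem.Str.isIn ct stripped) else is_table
      if is_table then
        pvLoopA cell_texts long_texts rest
          ((if start.isNone then some i else start), some i)
      else
        pvLoopA cell_texts long_texts rest (start, end_)

def find_table_region_py (lines : List String) (cell_texts : List String) : Option Int × Option Int :=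
  let long_texts := PySem.Set.ofList (cell_texts.filter (fun t => 5 < PySem.Str.len t))
  pvLoopA cell_texts long_texts (PySem.List.enumerate lines) (none, none)

-- ===== PORT B =====
-- Source B's helper _matches(line)
def pvMatches (cell_texts long_texts : List String) (line : String) : Bool :=
  let s := PySem.Str.strip line
  !(s == "") && (PySem.Set.contains cell_texts s || long_texts.any (fun t => PySem.Str.isIn t s))

-- Source B's 'for …: if _matches(line): take the index; break' loop (the backward loop of
-- Source B is this same loop run on the reversed enumeration)
def pvFindFirst (p : String → Bool) : List (Int × String) → Option Int
  | [] => none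
  | (i, line) :: rest => if p line then some i else pvFindFirst p rest

def find_table_region_py_alt (lines : List String) (cell_texts : List String) : Option Int × Option Int :=
  let long_texts := cell_texts.filter (fun t => 5 < PySem.Str.len t)
  match pvFindFirst (pvMatches cell_texts long_texts) (PySem.List.enumerate lines) with
  | none => (none, none)
  | some i =>
    (some i, pvFindFirst (pvMatches cell_texts long_texts) (PySem.List.enumerate lines).reverse)

-- ===== PRECONDITION & SPEC =====
def Spec_find_table_region_py (lines : List String) (cell_texts : List String) (out : Option Int × Option Int) : Prop := out = find_table_region_py_alt lines cell_texts
instance (lines : List String) (cell_texts : List String) (out : Option Int × Option Int) : Decidable (Spec_find_table_region_py lines cell_texts out) := by unfold Spec_find_table_region_py; infer_instance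

-- ===== CLAIM (what is proved, stated in full; the proofs are below) =====
def Claim_equal_find_table_region_py : Prop := ∀ (lines : List String) (cell_texts : List String), Dom_find_table_region_py lines cell_texts → Spec_find_table_region_py lines cell_texts (find_table_region_py lines cell_texts)

-- ===== LEMMAS AND PROOFS =====

lemma pvFindFirst_append (p : String → Bool) (xs ys : List (Int × String)) :
    pvFindFirst p (xs ++ ys) = (pvFindFirst p xs).orElse (fun _ => pvFindFirst p ys) := by
  induction xs with
  | nil => simp [pvFindFirst]
  | cons x rest ih =>
    obtain ⟨i, l⟩ := x
    by_cases h : p l <;> simp [pvFindFirst, h, ih]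

lemma pvFindFirst_eq_none_iff (p : String → Bool) (xs : List (Int × String)) :
    pvFindFirst p xs = none ↔ ∀ x ∈ xs, p x.2 = false := by
  induction xs with
  | nil => simp [pvFindFirst]
  | cons x rest ih =>
    obtain ⟨i, l⟩ := x
    by_cases h : p l <;> simp [pvFindFirst, h, ih]

lemma pvAny_ofList (xs : List String) (f : String → Bool) :
    (PySem.Set.ofList xs).any f = xs.any f := by
  rw [Bool.eq_iff_iff]
  simp only [List.any_eq_true]
  constructor
  · rintro ⟨a, ha, hf⟩; exact ⟨a, (PySem.Set.mem_ofList xs a).mp ha, hf⟩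
  · rintro ⟨a, ha, hf⟩; exact ⟨a, (PySem.Set.mem_ofList xs a).mpr ha, hf⟩

-- A's inline test equals Source B's _matches whether or not long_texts is deduplicated
lemma pvMatches_ofList (ct lt : List String) (l : String) :
    pvMatches ct (PySem.Set.ofList lt) l = pvMatches ct lt l := by
  simp [pvMatches, pvAny_ofList]

-- one step of A's loop, phrased through the _matches test
lemma pvLoopA_cons (ct lt : List String) (i : Int) (l : String)
    (rest : List (Int × String)) (s e : Option Int) :
    pvLoopA ct lt ((i, l) :: rest) (s, e) =
      if pvMatches ct lt l then
        pvLoopA ct lt rest ((if s.isNone then some i else s), some i)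
      else
        pvLoopA ct lt rest (s, e) := by
  simp only [pvLoopA, pvMatches]
  by_cases h1 : (PySem.Str.strip l == "") = true
  · simp [h1]
  · have h1' : (PySem.Str.strip l == "") = false := by simpa using h1
    by_cases hc : PySem.Set.contains ct (PySem.Str.strip l) <;>
      by_cases ha : lt.any (fun t => PySem.Str.isIn t (PySem.Str.strip l)) <;>
        simp [h1']

-- A's loop, characterised by the two early-exit scans of B
lemma pvLoopA_eq (ct lt : List String) (xs : List (Int × String)) (s e : Option Int) :
    pvLoopA ct lt xs (s, e) =
      ((match s with
        | some v => some v
        | none => pvFindFirst (pvMatches ct lt) xs),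
       (match pvFindFirst (pvMatches ct lt) xs.reverse with
        | some j => some j
        | none => e)) := by
  induction xs generalizing s e with
  | nil => cases s <;> simp [pvLoopA, pvFindFirst]
  | cons x rest ih =>
    obtain ⟨i, l⟩ := x
    rw [pvLoopA_cons]
    by_cases hm : pvMatches ct lt l
    · rw [if_pos hm, ih]
      rcases hL : pvFindFirst (pvMatches ct lt) rest.reverse with _ | j <;>
        cases s <;>
          simp [pvFindFirst, pvFindFirst_append, hm, hL]
    · rw [if_neg hm, ih]
      have hm' : pvMatches ct lt l = false := by simpa using hm
      rcases hL : pvFindFirst (pvMatches ct lt) rest.reverse with _ | j <;>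
        cases s <;>
          simp [pvFindFirst, pvFindFirst_append, hm', hL]

-- ===== VERDICT (by name: the statement is the Claim_ definition above) =====
theorem find_table_region_py_spec : Claim_equal_find_table_region_py := by
  intro lines cell_texts _
  unfold Spec_find_table_region_py find_table_region_py find_table_region_py_alt
  set lt := cell_texts.filter (fun t => 5 < PySem.Str.len t) with hlt
  have hff : ∀ ys, pvFindFirst (pvMatches cell_texts (PySem.Set.ofList lt)) ys
      = pvFindFirst (pvMatches cell_texts lt) ys := by
    intro ys
    induction ys with
    | nil => rfl
    | cons x rest ih =>
      obtain ⟨i, l⟩ := x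
      simp [pvFindFirst, pvMatches_ofList, ih]
  rw [pvLoopA_eq, hff, hff]
  rcases hF : pvFindFirst (pvMatches cell_texts lt) (PySem.List.enumerate lines) with _ | i
  · -- no match anywhere: the reverse scan also finds nothing
    have hrev : pvFindFirst (pvMatches cell_texts lt) (PySem.List.enumerate lines).reverse = none := by
      rw [pvFindFirst_eq_none_iff] at hF ⊢
      intro x hx; exact hF x (List.mem_reverse.mp hx)
    simp [hF, hrev]
  · -- a match exists, so the reverse scan finds one too
    rcases hL : pvFindFirst (pvMatches cell_texts lt) (PySem.List.enumerate lines).reverse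
        with _ | j
    · exfalso
      rw [pvFindFirst_eq_none_iff] at hL
      have hnone : pvFindFirst (pvMatches cell_texts lt) (PySem.List.enumerate lines) = none := by
        rw [pvFindFirst_eq_none_iff]
        intro x hx; exact hL x (List.mem_reverse.mpr hx)
      simp [hnone] at hF
    · simp [hF, hL]
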